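-- pv_equiv track=rewrite | github.com/seLain/codesnippets | python3/hackerrank_leetcode/lexicographically_minimal_string/main.py | look_forward
-- ===== SOURCE A (Python) =====
-- def look_forward(a, b):
--     # find smaller option layer by layer
--     for i in range(-1, -min(len(a), len(b)), -1):
--         if a[i-1] == b[i-1]:
--             continue
--         elif a[i-1] < b[i-1]:
--             return a
--         elif a[i-1] > b[i-1]:
--             return b
--     # can not find smaller one until the last layer
--     if len(a) <= len(b):
--         return b
--     else:
--         return a
-- ===== SOURCE B (Python) =====
-- def look_forward(a, b):
--     # Compare the right-aligned windows (excluding the final character),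
--     # reversed so the char nearest the end is most significant.
--     m = min(len(a), len(b))
--     ra = a[len(a) - m:len(a) - 1][::-1]
--     rb = b[len(b) - m:len(b) - 1][::-1]
--     if ra < rb:
--         return a
--     if ra > rb:
--         return b
--     return b if len(a) <= len(b) else a
-- ===== Notes on version B (the rewrite author's own statement) =====
-- stated objective: idiomatic
-- what changed: Replaces A's explicit backwards index loop with early returns by slicing the right-aligned windows (excluding the last character), reversing them, and deciding with one built-in lexicographic string comparison plus the length tiebreak.
import Mathlib
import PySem

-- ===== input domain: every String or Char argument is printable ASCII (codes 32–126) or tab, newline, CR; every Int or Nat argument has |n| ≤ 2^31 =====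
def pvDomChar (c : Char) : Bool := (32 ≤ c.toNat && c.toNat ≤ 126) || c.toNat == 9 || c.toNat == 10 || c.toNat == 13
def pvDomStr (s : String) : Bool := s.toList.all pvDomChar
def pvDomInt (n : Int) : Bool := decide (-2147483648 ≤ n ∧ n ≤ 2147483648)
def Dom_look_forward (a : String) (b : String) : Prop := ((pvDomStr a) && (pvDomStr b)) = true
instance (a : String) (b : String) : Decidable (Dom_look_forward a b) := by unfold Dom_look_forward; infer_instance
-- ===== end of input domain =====

-- B replaces A's backwards index loop by slicing the right-aligned windows (minus the last
-- character), reversing them and using the built-in lexicographic string comparison (idiomatic).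


-- ===== PORT A =====
-- the for-loop with its early returns; the `| _, _ => ""` branch is unreachable
-- (every index the loop uses is in range), kept only to make the match total
def lookA_go (a : String) (b : String) : List Int → String
  | [] => if PySem.Str.len a ≤ PySem.Str.len b then b else a
  | i :: rest =>
    match PySem.Str.pyGet? a (i - 1), PySem.Str.pyGet? b (i - 1) with
    | some x, some y =>
      if x = y then lookA_go a b rest
      else if x < y then a
      else if y < x then b
      else lookA_go a b rest
    | _, _ => ""

def look_forward (a : String) (b : String) : String :=
  lookA_go a b (PySem.List.pyRange (-1) (-(min (PySem.Str.len a) (PySem.Str.len b))) (-1))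

-- ===== PORT B =====
-- m = min(len(a), len(b)); ra = a[len(a)-m:len(a)-1][::-1]; rb likewise; compare, then tiebreak.
-- `[::-1]` is ported as list reverse (PySem.Str.slice?_none_none_neg_one).
def look_forward_alt (a : String) (b : String) : String :=
  let la := PySem.Str.len a
  let lb := PySem.Str.len b
  let m := min la lb
  let ra := String.ofList (PySem.Str.slice a (some (la - m)) (some (la - 1))).toList.reverse
  let rb := String.ofList (PySem.Str.slice b (some (lb - m)) (some (lb - 1))).toList.reverse
  if ra < rb then a
  else if rb < ra then b
  else if la ≤ lb then b else a

-- ===== PRECONDITION & SPEC =====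
def Spec_look_forward (a : String) (b : String) (out : String) : Prop := out = look_forward_alt a b
instance (a : String) (b : String) (out : String) : Decidable (Spec_look_forward a b out) := by unfold Spec_look_forward; infer_instance

-- ===== CLAIM (what is proved, stated in full; the proofs are below) =====
def Claim_equal_look_forward : Prop := ∀ (a : String) (b : String), Dom_look_forward a b → Spec_look_forward a b (look_forward a b)

-- ===== LEMMAS AND PROOFS =====

-- the reversed comparison window of s for a given m = min length
def revWin (s : String) (m : Nat) : List Char := (s.toList.reverse.tail).take (m - 1)

-- pairwise scan that mirrors what A's loop does on the two reversed windows
def scanPairs (a : String) (b : String) : List Char → List Char → String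
  | x :: xs, y :: ys =>
    if x = y then scanPairs a b xs ys
    else if x < y then a else b
  | _, _ => if a.toList.length ≤ b.toList.length then b else a

lemma length_revWin (s : String) (m : Nat) (hm : m ≤ s.toList.length) :
    (revWin s m).length = m - 1 := by
  simp [revWin]
  simp at hm
  omega

lemma getElem_revWin (s : String) (m j : Nat) (hm : m ≤ s.toList.length) (hj : j < m - 1) :
    (revWin s m)[j]'(by rw [length_revWin s m hm]; exact hj)
      = s.toList[s.toList.length - (j + 2)]'(by omega) := by
  simp [revWin, List.getElem_take, List.getElem_reverse]
  congr 1
  omega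

-- B's slice-then-reverse equals the reversed window
lemma slice_rev_eq_revWin (s : String) (m : Nat) (hm : m ≤ s.toList.length) :
    (PySem.Str.slice s (some ((s.toList.length : Int) - m)) (some ((s.toList.length : Int) - 1))).toList.reverse
      = revWin s m := by
  rcases Nat.eq_zero_or_pos s.toList.length with h0 | hpos
  · have : s.toList = [] := List.length_eq_zero_iff.mp h0
    simp [PySem.Str.slice, this, PySem.Chars.slice, PySem.List.slice, revWin]
  · have h1 : ((s.toList.length : Int) - m) = ((s.toList.length - m : Nat) : Int) := by omega
    have h2 : ((s.toList.length : Int) - 1) = ((s.toList.length - 1 : Nat) : Int) := by omega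
    rw [PySem.Str.slice, h1, h2, PySem.Chars.slice, PySem.List.slice_natCast]
    apply List.ext_getElem
    · simp [revWin]
      simp at hm
      omega
    · intro j hj hj'
      have hj2 : j < m - 1 := by
        simp [List.length_take, List.length_drop] at hj
        simp at hm
        omega
      rw [getElem_revWin s m j hm hj2]
      simp [List.getElem_reverse, List.getElem_take, List.getElem_drop]
      congr 1
      simp at hm
      omega

-- the scan of two equal-length lists is the built-in lexicographic comparison plus the tiebreak
lemma scanPairs_eq_lex (a b : String) : ∀ (xs ys : List Char), xs.length = ys.length →
    scanPairs a b xs ys =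
      if xs < ys then a else if ys < xs then b
      else if a.toList.length ≤ b.toList.length then b else a := by
  intro xs
  induction xs with
  | nil =>
    intro ys h
    have : ys = [] := List.length_eq_zero_iff.mp h.symm
    subst this
    simp [scanPairs]
  | cons x xs ih =>
    intro ys h
    cases ys with
    | nil => simp at h
    | cons y ys =>
      simp at h
      by_cases hxy : x = y
      · subst hxy
        rw [scanPairs, if_pos rfl, ih ys h]
        simp
      · rcases lt_or_gt_of_ne hxy with hlt | hgt
        · rw [scanPairs, if_neg hxy, if_pos hlt]
          rw [if_pos (List.cons_lt_cons_iff.mpr (Or.inl hlt))]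
        · rw [scanPairs, if_neg hxy, if_neg (not_lt_of_gt hgt)]
          rw [if_neg, if_pos (List.cons_lt_cons_iff.mpr (Or.inl hgt))]
          intro hcons
          rcases List.cons_lt_cons_iff.mp hcons with h' | ⟨h', _⟩
          · exact absurd h' (not_lt_of_gt hgt)
          · exact absurd h' hxy

-- A's loop from iteration j onward scans the dropped reversed windows
lemma loopA_eq_scan (a b : String) : ∀ (fuel j : Nat),
    min a.toList.length b.toList.length - j ≤ fuel →
    lookA_go a b (PySem.List.pyRange (-(j : Int) - 1) (-((min a.toList.length b.toList.length : Nat) : Int)) (-1))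
      = scanPairs a b ((revWin a (min a.toList.length b.toList.length)).drop j)
                      ((revWin b (min a.toList.length b.toList.length)).drop j) := by
  intro fuel
  induction fuel with
  | zero =>
    intro j hj
    have hm : min a.toList.length b.toList.length ≤ j := by omega
    rw [PySem.List.pyRange_neg_one_eq_nil (by omega)]
    rw [List.drop_eq_nil_of_le (by rw [length_revWin a _ (Nat.min_le_left _ _)]; omega)]
    rw [List.drop_eq_nil_of_le (by rw [length_revWin b _ (Nat.min_le_right _ _)]; omega)]
    simp [lookA_go, scanPairs, PySem.Str.len_eq]
  | succ f ih =>
    intro j hj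
    set m := min a.toList.length b.toList.length with hmdef
    by_cases hstep : j + 1 < m
    · have hrange : PySem.List.pyRange (-(j : Int) - 1) (-(m : Int)) (-1)
          = (-(j : Int) - 1) :: PySem.List.pyRange (-(j : Int) - 1 - 1) (-(m : Int)) (-1) :=
        PySem.List.pyRange_neg_one_cons (by omega)
      have hidx : (-(j : Int) - 1 - 1) = -((j + 2 : Nat) : Int) := by push_cast; ring
      have hja : j + 2 ≤ a.toList.length := by omega
      have hjb : j + 2 ≤ b.toList.length := by omega
      have hga : PySem.Str.pyGet? a (-(j : Int) - 1 - 1)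
          = some (a.toList[a.toList.length - (j + 2)]'(by omega)) := by
        rw [hidx, PySem.Str.pyGet?, PySem.Chars.pyGet?,
          PySem.List.pyGet?_neg_natCast a.toList (j + 2) (by omega) hja]
        exact List.getElem?_eq_getElem _
      have hgb : PySem.Str.pyGet? b (-(j : Int) - 1 - 1)
          = some (b.toList[b.toList.length - (j + 2)]'(by omega)) := by
        rw [hidx, PySem.Str.pyGet?, PySem.Chars.pyGet?,
          PySem.List.pyGet?_neg_natCast b.toList (j + 2) (by omega) hjb]
        exact List.getElem?_eq_getElem _
      have hdra : (revWin a m).drop j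
          = (a.toList[a.toList.length - (j + 2)]'(by omega)) :: (revWin a m).drop (j + 1) := by
        rw [List.drop_eq_getElem_cons (by rw [length_revWin a m (Nat.min_le_left _ _)]; omega)]
        rw [getElem_revWin a m j (Nat.min_le_left _ _) (by omega)]
      have hdrb : (revWin b m).drop j
          = (b.toList[b.toList.length - (j + 2)]'(by omega)) :: (revWin b m).drop (j + 1) := by
        rw [List.drop_eq_getElem_cons (by rw [length_revWin b m (Nat.min_le_right _ _)]; omega)]
        rw [getElem_revWin b m j (Nat.min_le_right _ _) (by omega)]
      have hrec := ih (j + 1) (by omega)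
      have hcast : (-((j + 1 : Nat) : Int) - 1) = (-(j : Int) - 1 - 1) := by push_cast; ring
      rw [hcast] at hrec
      rw [hrange, lookA_go, hga, hgb, hdra, hdrb, scanPairs, hrec]
      by_cases heq : a.toList[a.toList.length - (j + 2)]'(by omega) = b.toList[b.toList.length - (j + 2)]'(by omega)
      · simp only [String.length_toList] at heq
        simp [heq]
      · by_cases hlt : a.toList[a.toList.length - (j + 2)]'(by omega) < b.toList[b.toList.length - (j + 2)]'(by omega)
        · simp only [String.length_toList] at heq hlt
          simp [heq, hlt]
        · have hgt : b.toList[b.toList.length - (j + 2)]'(by omega) < a.toList[a.toList.length - (j + 2)]'(by omega) :=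
            lt_of_le_of_ne (not_lt.mp hlt) (fun h => heq h.symm)
          simp only [String.length_toList] at heq hlt hgt
          simp [heq, hlt, hgt]
    · have hm : m ≤ j + 1 := by omega
      rw [PySem.List.pyRange_neg_one_eq_nil (by omega)]
      rw [List.drop_eq_nil_of_le (by rw [length_revWin a _ (Nat.min_le_left _ _)]; omega)]
      rw [List.drop_eq_nil_of_le (by rw [length_revWin b _ (Nat.min_le_right _ _)]; omega)]
      simp [lookA_go, scanPairs, PySem.Str.len_eq]

-- B in terms of the reversed windows
lemma alt_eq_windows (a b : String) :
    look_forward_alt a b =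
      (if revWin a (min a.toList.length b.toList.length) < revWin b (min a.toList.length b.toList.length) then a
       else if revWin b (min a.toList.length b.toList.length) < revWin a (min a.toList.length b.toList.length) then b
       else if a.toList.length ≤ b.toList.length then b else a) := by
  unfold look_forward_alt
  simp only [PySem.Str.len_eq]
  rw [show (min (↑a.toList.length) (↑b.toList.length) : Int)
      = ((min a.toList.length b.toList.length : Nat) : Int) by push_cast; rfl]
  rw [slice_rev_eq_revWin a _ (Nat.min_le_left _ _), slice_rev_eq_revWin b _ (Nat.min_le_right _ _)]
  simp [Nat.cast_le]

-- ===== VERDICT (by name: the statement is the Claim_ definition above) =====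
theorem look_forward_spec : Claim_equal_look_forward := by
  intro a b _
  unfold Spec_look_forward
  unfold look_forward
  have hmin : min (PySem.Str.len a) (PySem.Str.len b)
      = ((min a.toList.length b.toList.length : Nat) : Int) := by
    simp [PySem.Str.len_eq, Nat.cast_min]
  rw [hmin]
  rw [show PySem.List.pyRange (-1) (-((min a.toList.length b.toList.length : Nat) : Int)) (-1)
      = PySem.List.pyRange (-((0 : Nat) : Int) - 1) (-((min a.toList.length b.toList.length : Nat) : Int)) (-1)
      by norm_num]
  rw [loopA_eq_scan a b (min a.toList.length b.toList.length) 0 (by omega)]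
  simp only [List.drop_zero]
  rw [scanPairs_eq_lex a b _ _
    (by rw [length_revWin a _ (Nat.min_le_left _ _), length_revWin b _ (Nat.min_le_right _ _)])]
  rw [alt_eq_windows a b]
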